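-- pv_equiv track=rewrite | github.com/TheAlienNetwork/NightVisionAI | modules/evidence_manager.py | _analyze_incident_severity
-- ===== SOURCE A (Python) =====
-- from typing import Dict, List, Optional, Any
--
-- def _analyze_incident_severity(incidents: List[Dict]) -> Dict:
--     """Analyze severity distribution of incidents"""
--     severity_counts = {1: 0, 2: 0, 3: 0, 4: 0}
--
--     for incident in incidents:
--         severity = incident.get('severity', 2)
--         if severity in severity_counts:
--             severity_counts[severity] += 1
--
--     return {
--         'Low': severity_counts[1],
--         'Medium': severity_counts[2],
--         'High': severity_counts[3],
--         'Critical': severity_counts[4]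
--     }
-- ===== SOURCE B (Python) =====
-- from typing import Dict, List
--
-- def _analyze_incident_severity(incidents: List[Dict]) -> Dict:
--     """Analyze severity distribution of incidents (one filtered count per label)."""
--     def count_level(level):
--         return sum(1 for i in incidents if i.get('severity', 2) == level)
--     return {
--         'Low': count_level(1),
--         'Medium': count_level(2),
--         'High': count_level(3),
--         'Critical': count_level(4),
--     }
-- ===== Notes on version B (the rewrite author's own statement) =====
-- stated objective: idiomatic
-- what changed: Replaces the mutable integer-keyed counter dict updated in one accumulate-then-relabel pass by four independent filtered counts, one per severity label, built directly into the result dict.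
import Mathlib
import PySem

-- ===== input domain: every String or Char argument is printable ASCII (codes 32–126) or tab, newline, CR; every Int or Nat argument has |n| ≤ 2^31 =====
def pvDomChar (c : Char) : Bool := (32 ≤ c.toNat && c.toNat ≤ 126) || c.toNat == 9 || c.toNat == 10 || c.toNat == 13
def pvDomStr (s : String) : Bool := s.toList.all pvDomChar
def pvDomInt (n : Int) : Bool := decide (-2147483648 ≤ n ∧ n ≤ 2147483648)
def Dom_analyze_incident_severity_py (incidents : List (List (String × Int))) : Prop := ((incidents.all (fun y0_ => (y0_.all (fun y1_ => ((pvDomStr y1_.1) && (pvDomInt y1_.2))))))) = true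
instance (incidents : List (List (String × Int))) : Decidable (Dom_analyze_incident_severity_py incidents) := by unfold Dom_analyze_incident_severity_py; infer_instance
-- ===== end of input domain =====

-- B replaces A's mutable integer-keyed counter dict by four independent filtered
-- counts, one per severity label (idiomatic; same O(n) cost).

-- shared helper: incident.get('severity', 2) on the association list (first match)
def pvSev (incident : List (String × Int)) : Int :=
  match incident.find? (fun p => p.1 == "severity") with
  | some p => p.2
  | none => 2

-- ===== PORT A =====
def analyze_incident_severity_py (incidents : List (List (String × Int))) : List (String × Int) :=
  let severity_counts : PySem.Dict Int Int :=
    PySem.Dict.ofList [(1, 0), (2, 0), (3, 0), (4, 0)]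
  let severity_counts :=
    incidents.foldl (fun counts incident =>
      let severity := pvSev incident
      if counts.contains severity then
        counts.insert severity (counts.getD severity 0 + 1)
      else counts) severity_counts
  [("Low", severity_counts.getD 1 0),
   ("Medium", severity_counts.getD 2 0),
   ("High", severity_counts.getD 3 0),
   ("Critical", severity_counts.getD 4 0)]

-- ===== PORT B =====
def pvCountLevel (incidents : List (List (String × Int))) (level : Int) : Int :=
  (incidents.countP (fun incident => pvSev incident == level) : Int)

def analyze_incident_severity_py_alt (incidents : List (List (String × Int))) : List (String × Int) :=
  [("Low", pvCountLevel incidents 1),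
   ("Medium", pvCountLevel incidents 2),
   ("High", pvCountLevel incidents 3),
   ("Critical", pvCountLevel incidents 4)]

-- ===== PRECONDITION & SPEC =====
def Spec_analyze_incident_severity_py (incidents : List (List (String × Int))) (out : List (String × Int)) : Prop := out = analyze_incident_severity_py_alt incidents
instance (incidents : List (List (String × Int))) (out : List (String × Int)) : Decidable (Spec_analyze_incident_severity_py incidents out) := by unfold Spec_analyze_incident_severity_py; infer_instance

-- ===== CLAIM (what is proved, stated in full; the proofs are below) =====
def Claim_equal_analyze_incident_severity_py : Prop := ∀ (incidents : List (List (String × Int))), Dom_analyze_incident_severity_py incidents → Spec_analyze_incident_severity_py incidents (analyze_incident_severity_py incidents)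

-- ===== LEMMAS AND PROOFS =====

-- A's loop keeps the counter dict in the fixed shape [(1,a),(2,b),(3,c),(4,d)];
-- each slot ends up increased by B's filtered count.
lemma pv_loop (incidents : List (List (String × Int))) (a b c d : Int) :
    incidents.foldl (fun counts incident =>
      if counts.contains (pvSev incident) then
        counts.insert (pvSev incident) (counts.getD (pvSev incident) 0 + 1)
      else counts) (PySem.Dict.mk [(1, a), (2, b), (3, c), (4, d)]) =
    PySem.Dict.mk [(1, a + pvCountLevel incidents 1),
                   (2, b + pvCountLevel incidents 2),
                   (3, c + pvCountLevel incidents 3),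
                   (4, d + pvCountLevel incidents 4)] := by
  induction incidents generalizing a b c d with
  | nil => simp [pvCountLevel]
  | cons inc rest ih =>
    have hc : ∀ (lvl : Int), pvCountLevel (inc :: rest) lvl =
        (if pvSev inc == lvl then 1 else 0) + pvCountLevel rest lvl := by
      intro lvl
      simp only [pvCountLevel, List.countP_cons]
      split <;> push_cast <;> ring
    simp only [List.foldl_cons, hc]
    by_cases h1 : pvSev inc = 1
    · have hd : (if (PySem.Dict.mk [((1:Int), a), (2, b), (3, c), (4, d)]).contains (pvSev inc) then
          (PySem.Dict.mk [((1:Int), a), (2, b), (3, c), (4, d)]).insert (pvSev inc)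
            ((PySem.Dict.mk [((1:Int), a), (2, b), (3, c), (4, d)]).getD (pvSev inc) 0 + 1)
        else PySem.Dict.mk [((1:Int), a), (2, b), (3, c), (4, d)]) =
          PySem.Dict.mk [(1, a + 1), (2, b), (3, c), (4, d)] := by
        simp [h1, PySem.Dict.contains, PySem.Dict.insert, PySem.Dict.getD, PySem.Dict.get?]
      rw [hd, ih]
      simp [h1]
      ring_nf
    · by_cases h2 : pvSev inc = 2
      · have hd : (if (PySem.Dict.mk [((1:Int), a), (2, b), (3, c), (4, d)]).contains (pvSev inc) then
            (PySem.Dict.mk [((1:Int), a), (2, b), (3, c), (4, d)]).insert (pvSev inc)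
              ((PySem.Dict.mk [((1:Int), a), (2, b), (3, c), (4, d)]).getD (pvSev inc) 0 + 1)
          else PySem.Dict.mk [((1:Int), a), (2, b), (3, c), (4, d)]) =
            PySem.Dict.mk [(1, a), (2, b + 1), (3, c), (4, d)] := by
          simp [h2, PySem.Dict.contains, PySem.Dict.insert, PySem.Dict.getD, PySem.Dict.get?]
        rw [hd, ih]
        simp [h2]
        ring_nf
      · by_cases h3 : pvSev inc = 3
        · have hd : (if (PySem.Dict.mk [((1:Int), a), (2, b), (3, c), (4, d)]).contains (pvSev inc) then
              (PySem.Dict.mk [((1:Int), a), (2, b), (3, c), (4, d)]).insert (pvSev inc)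
                ((PySem.Dict.mk [((1:Int), a), (2, b), (3, c), (4, d)]).getD (pvSev inc) 0 + 1)
            else PySem.Dict.mk [((1:Int), a), (2, b), (3, c), (4, d)]) =
              PySem.Dict.mk [(1, a), (2, b), (3, c + 1), (4, d)] := by
            simp [h3, PySem.Dict.contains, PySem.Dict.insert, PySem.Dict.getD, PySem.Dict.get?]
          rw [hd, ih]
          simp [h3]
          ring_nf
        · by_cases h4 : pvSev inc = 4
          · have hd : (if (PySem.Dict.mk [((1:Int), a), (2, b), (3, c), (4, d)]).contains (pvSev inc) then
                (PySem.Dict.mk [((1:Int), a), (2, b), (3, c), (4, d)]).insert (pvSev inc)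
                  ((PySem.Dict.mk [((1:Int), a), (2, b), (3, c), (4, d)]).getD (pvSev inc) 0 + 1)
              else PySem.Dict.mk [((1:Int), a), (2, b), (3, c), (4, d)]) =
                PySem.Dict.mk [(1, a), (2, b), (3, c), (4, d + 1)] := by
              simp [h4, PySem.Dict.contains, PySem.Dict.insert, PySem.Dict.getD, PySem.Dict.get?]
            rw [hd, ih]
            simp [h4]
            ring_nf
          · have hd : (if (PySem.Dict.mk [((1:Int), a), (2, b), (3, c), (4, d)]).contains (pvSev inc) then
                (PySem.Dict.mk [((1:Int), a), (2, b), (3, c), (4, d)]).insert (pvSev inc)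
                  ((PySem.Dict.mk [((1:Int), a), (2, b), (3, c), (4, d)]).getD (pvSev inc) 0 + 1)
              else PySem.Dict.mk [((1:Int), a), (2, b), (3, c), (4, d)]) =
                PySem.Dict.mk [(1, a), (2, b), (3, c), (4, d)] := by
              have hnc : (PySem.Dict.mk [((1:Int), a), (2, b), (3, c), (4, d)]).contains (pvSev inc) = false := by
                simp [PySem.Dict.contains]
                omega
              simp [hnc]
            rw [hd, ih]
            simp [h1, h2, h3, h4]

-- ===== VERDICT (by name: the statement is the Claim_ definition above) =====
theorem analyze_incident_severity_py_spec : Claim_equal_analyze_incident_severity_py := by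
  intro incidents _
  unfold Spec_analyze_incident_severity_py analyze_incident_severity_py analyze_incident_severity_py_alt
  have h0 : (PySem.Dict.ofList [((1:Int), (0:Int)), (2, 0), (3, 0), (4, 0)]) =
      PySem.Dict.mk [(1, 0), (2, 0), (3, 0), (4, 0)] := by decide
  dsimp only
  rw [h0, pv_loop]
  simp [PySem.Dict.getD, PySem.Dict.get?]
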